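-- pv_equiv track=rewrite | github.com/Adagard-Trios/Veracity | src/nodes/win_loss_node.py | _build_signal_matrix
-- ===== SOURCE A (Python) =====
-- def _build_signal_matrix(signal_blocks: list[dict], brand: str) -> str:
--     """Build a markdown Win/Loss Signal Matrix table from extracted signal blocks."""
--     if not signal_blocks:
--         return "| Signal | Type | Frequency | Confidence | Source |\n|--------|------|-----------|------------|--------|\n| No signals extracted | — | — | — | — |"
--
--     rows: list[str] = []
--     rows.append("| Signal | Type | Frequency | Confidence | Source |")
--     rows.append("|--------|------|-----------|------------|--------|")
--
--     for block in sorted(signal_blocks, key=lambda x: x["confidence"], reverse=True):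
--         source = block["source"]
--         content = block["content"]
--         confidence = block["confidence"]
--
--         # Extract win/loss rows from the content block
--         lines = content.splitlines()
--         current_type = "Neutral"
--         for line in lines:
--             line = line.strip()
--             if "WIN REASONS" in line.upper():
--                 current_type = "Win"
--                 continue
--             if "LOSS REASONS" in line.upper() or "SWITCH RISKS" in line.upper():
--                 current_type = "Loss"
--                 continue
--             if "NEUTRAL OBSERVATIONS" in line.upper():
--                 current_type = "Neutral"
--                 continue
--             if line.startswith("- ") and len(line) > 5:
--                 signal_text = line[2:].split(":")[0].strip()[:80]
--                 freq_match = ""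
--                 if "frequency: high" in line.lower():
--                     freq_match = "High"
--                 elif "frequency: medium" in line.lower():
--                     freq_match = "Medium"
--                 elif "frequency: low" in line.lower():
--                     freq_match = "Low"
--                 else:
--                     freq_match = "Unknown"
--                 rows.append(
--                     f"| {signal_text} | {current_type} | {freq_match} | {confidence} | {source} |"
--                 )
--
--     if len(rows) <= 2:
--         rows.append(f"| Signals present but unparseable | — | — | — | multiple |")
--
--     return "\n".join(rows)
-- ===== SOURCE B (Python) =====
-- _HEADER = ["| Signal | Type | Frequency | Confidence | Source |",
--            "|--------|------|-----------|------------|--------|"]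
--
-- _FREQ = [("frequency: high", "High"), ("frequency: medium", "Medium"), ("frequency: low", "Low")]
--
--
-- def _header_type(line):
--     u = line.upper()
--     if "WIN REASONS" in u:
--         return "Win"
--     if "LOSS REASONS" in u or "SWITCH RISKS" in u:
--         return "Loss"
--     if "NEUTRAL OBSERVATIONS" in u:
--         return "Neutral"
--     return None
--
--
-- def _sections(content):
--     """Pass 1: partition stripped lines into ordered (type, bullet_lines) groups."""
--     secs = [("Neutral", [])]
--     for raw in content.splitlines():
--         line = raw.strip()
--         t = _header_type(line)
--         if t is None:
--             secs[-1][1].append(line)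
--         else:
--             secs.append((t, []))
--     return secs
--
--
-- def _row(bullet, typ, confidence, source):
--     signal_text = bullet[2:].split(":")[0].strip()[:80]
--     low = bullet.lower()
--     freq = next((name for pat, name in _FREQ if pat in low), "Unknown")
--     return f"| {signal_text} | {typ} | {freq} | {confidence} | {source} |"
--
--
-- def _build_signal_matrix(signal_blocks: list[dict], brand: str) -> str:
--     """Build a markdown Win/Loss Signal Matrix table from extracted signal blocks."""
--     if not signal_blocks:
--         return "\n".join(_HEADER + ["| No signals extracted | — | — | — | — |"])
--
--     body = []
--     for block in sorted(signal_blocks, key=lambda x: x["confidence"], reverse=True):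
--         for typ, bullets in _sections(block["content"]):
--             for b in bullets:
--                 if b.startswith("- ") and len(b) > 5:
--                     body.append(_row(b, typ, block["confidence"], block["source"]))
--
--     if not body:
--         body = ["| Signals present but unparseable | — | — | — | multiple |"]
--     return "\n".join(_HEADER + body)
-- ===== Notes on version B (the rewrite author's own statement) =====
-- stated objective: alternative
-- what changed: Replaces A's single stateful line scan (mutable current_type threaded through one loop that also appends rows) by a two-pass pipeline: pass 1 partitions each block's stripped lines into ordered (type, bullet_lines) sections keyed by the header keywords, pass 2 renders rows from the grouped bullets, with the frequency picked from a declarative pattern table instead of an if/elif chain.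
import Mathlib
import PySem

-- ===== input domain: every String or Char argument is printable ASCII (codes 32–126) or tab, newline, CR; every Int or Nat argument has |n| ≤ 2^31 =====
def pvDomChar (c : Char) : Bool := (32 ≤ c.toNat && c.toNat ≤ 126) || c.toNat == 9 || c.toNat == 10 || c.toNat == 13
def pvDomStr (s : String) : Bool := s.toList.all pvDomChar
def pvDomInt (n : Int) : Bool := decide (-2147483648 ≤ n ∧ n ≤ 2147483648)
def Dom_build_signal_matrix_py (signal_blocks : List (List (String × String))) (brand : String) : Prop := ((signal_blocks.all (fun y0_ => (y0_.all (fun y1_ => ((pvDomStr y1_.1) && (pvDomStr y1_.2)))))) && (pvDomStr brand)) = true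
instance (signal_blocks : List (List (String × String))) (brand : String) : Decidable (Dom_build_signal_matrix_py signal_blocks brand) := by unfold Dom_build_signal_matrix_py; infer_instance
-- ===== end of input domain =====

-- B re-implements the same table builder in two passes (group lines into (type, bullets)
-- sections, then render rows), proved to return exactly A's string on Pre_ (all three dict
-- keys present; outside Pre_ Python A raises KeyError).

-- ===== PORT A =====
-- A's per-line step of the stateful scan; the state is (current_type, rows)
def pvA_lineStep (confidence source : String) (st : String × List String) (rawline : String) : String × List String :=
  let line := PySem.Str.strip rawline
  if PySem.Str.isIn "WIN REASONS" (PySem.Str.upper line) then ("Win", st.2)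
  else if PySem.Str.isIn "LOSS REASONS" (PySem.Str.upper line) || PySem.Str.isIn "SWITCH RISKS" (PySem.Str.upper line) then ("Loss", st.2)
  else if PySem.Str.isIn "NEUTRAL OBSERVATIONS" (PySem.Str.upper line) then ("Neutral", st.2)
  else if PySem.Str.startswith line "- " && decide ((5 : Int) < PySem.Str.len line) then
    let signal_text := PySem.Str.slice (PySem.Str.strip (((PySem.Str.split? (PySem.Str.slice line (some 2) none) ":").getD []).headD "")) none (some 80)
    let freq_match :=
      if PySem.Str.isIn "frequency: high" (PySem.Str.lower line) then "High"
      else if PySem.Str.isIn "frequency: medium" (PySem.Str.lower line) then "Medium"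
      else if PySem.Str.isIn "frequency: low" (PySem.Str.lower line) then "Low"
      else "Unknown"
    (st.1, st.2 ++ ["| " ++ signal_text ++ " | " ++ st.1 ++ " | " ++ freq_match ++ " | " ++ confidence ++ " | " ++ source ++ " |"])
  else st

def pvA_blockStep (rows : List String) (block : List (String × String)) : List String :=
  let source := (PySem.Dict.mk block).getD "source" ""
  let content := (PySem.Dict.mk block).getD "content" ""
  let confidence := (PySem.Dict.mk block).getD "confidence" ""
  ((PySem.Str.splitlines content).foldl (pvA_lineStep confidence source) ("Neutral", rows)).2

def build_signal_matrix_py (signal_blocks : List (List (String × String))) (brand : String) : String :=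
  if signal_blocks = [] then
    "| Signal | Type | Frequency | Confidence | Source |\n|--------|------|-----------|------------|--------|\n| No signals extracted | — | — | — | — |"
  else
    let rows : List String := ["| Signal | Type | Frequency | Confidence | Source |", "|--------|------|-----------|------------|--------|"]
    let rows := (PySem.List.sorted signal_blocks (fun x => (PySem.Dict.mk x).getD "confidence" "") true).foldl pvA_blockStep rows
    let rows := if rows.length ≤ 2 then rows ++ ["| Signals present but unparseable | — | — | — | multiple |"] else rows
    PySem.Str.join "\n" rows

-- ===== PORT B =====
def pvB_headerType (line : String) : Option String :=
  let u := PySem.Str.upper line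
  if PySem.Str.isIn "WIN REASONS" u then some "Win"
  else if PySem.Str.isIn "LOSS REASONS" u || PySem.Str.isIn "SWITCH RISKS" u then some "Loss"
  else if PySem.Str.isIn "NEUTRAL OBSERVATIONS" u then some "Neutral"
  else none

-- pass 1: partition the stripped lines into ordered (type, bullet_lines) sections
def pvB_secStep (secs : List (String × List String)) (raw : String) : List (String × List String) :=
  let line := PySem.Str.strip raw
  match pvB_headerType line with
  | none => secs.dropLast ++ [((secs.getLastD ("Neutral", [])).1, (secs.getLastD ("Neutral", [])).2 ++ [line])]
  | some t => secs ++ [(t, [])]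

def pvB_sections (content : String) : List (String × List String) :=
  (PySem.Str.splitlines content).foldl pvB_secStep [("Neutral", [])]

def pvB_freqTable : List (String × String) := [("frequency: high", "High"), ("frequency: medium", "Medium"), ("frequency: low", "Low")]

def pvB_row (bullet typ confidence source : String) : String :=
  let signal_text := PySem.Str.slice (PySem.Str.strip (((PySem.Str.split? (PySem.Str.slice bullet (some 2) none) ":").getD []).headD "")) none (some 80)
  let low := PySem.Str.lower bullet
  let freq := ((pvB_freqTable.find? (fun p => PySem.Str.isIn p.1 low)).map (·.2)).getD "Unknown"
  "| " ++ signal_text ++ " | " ++ typ ++ " | " ++ freq ++ " | " ++ confidence ++ " | " ++ source ++ " |"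

def pvB_emitBullet (typ confidence source : String) (body : List String) (b : String) : List String :=
  if PySem.Str.startswith b "- " && decide ((5 : Int) < PySem.Str.len b) then body ++ [pvB_row b typ confidence source] else body

def pvB_emitSec (confidence source : String) (body : List String) (sec : String × List String) : List String :=
  sec.2.foldl (pvB_emitBullet sec.1 confidence source) body

def pvB_blockStep (body : List String) (block : List (String × String)) : List String :=
  (pvB_sections ((PySem.Dict.mk block).getD "content" "")).foldl
    (pvB_emitSec ((PySem.Dict.mk block).getD "confidence" "") ((PySem.Dict.mk block).getD "source" "")) body

def pvB_header : List String := ["| Signal | Type | Frequency | Confidence | Source |", "|--------|------|-----------|------------|--------|"]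

def build_signal_matrix_py_alt (signal_blocks : List (List (String × String))) (brand : String) : String :=
  if signal_blocks = [] then
    PySem.Str.join "\n" (pvB_header ++ ["| No signals extracted | — | — | — | — |"])
  else
    let body := (PySem.List.sorted signal_blocks (fun x => (PySem.Dict.mk x).getD "confidence" "") true).foldl pvB_blockStep []
    let body := if body = [] then ["| Signals present but unparseable | — | — | — | multiple |"] else body
    PySem.Str.join "\n" (pvB_header ++ body)

-- ===== PRECONDITION & SPEC =====
-- Pre_ excludes blocks missing any of the keys "source", "content", "confidence":
-- there Python A raises KeyError (in the sort key or in the body) and returns nothing.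
def Pre_build_signal_matrix_py (signal_blocks : List (List (String × String))) (brand : String) : Prop :=
  signal_blocks.all (fun b => (PySem.Dict.mk b).contains "confidence" && (PySem.Dict.mk b).contains "source" && (PySem.Dict.mk b).contains "content") = true
instance (signal_blocks : List (List (String × String))) (brand : String) : Decidable (Pre_build_signal_matrix_py signal_blocks brand) := by unfold Pre_build_signal_matrix_py; infer_instance

def pvWitness_build_signal_matrix_py : (List (List (String × String))) × String :=
  ([[("confidence", "0.9"), ("source", "calls"), ("content", "WIN REASONS\n- fast: frequency: high")]], "Acme")

def Spec_build_signal_matrix_py (signal_blocks : List (List (String × String))) (brand : String) (out : String) : Prop := out = build_signal_matrix_py_alt signal_blocks brand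
instance (signal_blocks : List (List (String × String))) (brand : String) (out : String) : Decidable (Spec_build_signal_matrix_py signal_blocks brand out) := by unfold Spec_build_signal_matrix_py; infer_instance

-- ===== CLAIM (what is proved, stated in full; the proofs are below) =====
def Claim_equal_build_signal_matrix_py : Prop := ∀ (signal_blocks : List (List (String × String))) (brand : String), Dom_build_signal_matrix_py signal_blocks brand → Pre_build_signal_matrix_py signal_blocks brand → Spec_build_signal_matrix_py signal_blocks brand (build_signal_matrix_py signal_blocks brand)

-- ===== LEMMAS AND PROOFS =====

theorem pv_freq (low : String) :
    ((pvB_freqTable.find? (fun p => PySem.Str.isIn p.1 low)).map (·.2)).getD "Unknown" =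
      (if PySem.Str.isIn "frequency: high" low then "High"
       else if PySem.Str.isIn "frequency: medium" low then "Medium"
       else if PySem.Str.isIn "frequency: low" low then "Low"
       else "Unknown") := by
  simp only [pvB_freqTable, List.find?]
  cases h1 : PySem.Str.isIn "frequency: high" low <;>
    cases h2 : PySem.Str.isIn "frequency: medium" low <;>
      cases h3 : PySem.Str.isIn "frequency: low" low <;> simp

-- A's per-line step, characterised through B's two helpers
theorem pvA_lineStep_char (c s cur : String) (r : List String) (raw : String) :
    pvA_lineStep c s (cur, r) raw =
      match pvB_headerType (PySem.Str.strip raw) with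
      | some t => (t, r)
      | none => (cur, pvB_emitBullet cur c s r (PySem.Str.strip raw)) := by
  simp only [pvA_lineStep, pvB_headerType, pvB_emitBullet, pvB_row]
  rw [pv_freq]
  split_ifs <;> rfl

theorem pvB_emitBullet_acc (t c s : String) (r : List String) (b : String) :
    pvB_emitBullet t c s r b = r ++ pvB_emitBullet t c s [] b := by
  simp only [pvB_emitBullet]; split_ifs <;> simp

-- rows only accumulate through A's line scan
theorem pvA_scan_acc (c s : String) (ls : List String) : ∀ (cur : String) (r : List String),
    List.foldl (pvA_lineStep c s) (cur, r) ls =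
      ((List.foldl (pvA_lineStep c s) (cur, []) ls).1,
        r ++ (List.foldl (pvA_lineStep c s) (cur, []) ls).2) := by
  induction ls with
  | nil => intro cur r; simp
  | cons l ls ih =>
    intro cur r
    simp only [List.foldl_cons, pvA_lineStep_char]
    cases h : pvB_headerType (PySem.Str.strip l) with
    | some t => dsimp only; exact ih t r
    | none =>
      dsimp only
      rw [pvB_emitBullet_acc cur c s r (PySem.Str.strip l),
        ih cur (r ++ pvB_emitBullet cur c s [] (PySem.Str.strip l)),
        ih cur (pvB_emitBullet cur c s [] (PySem.Str.strip l))]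
      simp

-- generic: a fold whose step only appends to the accumulator
theorem pv_foldl_acc {α : Type} (f : List String → α → List String)
    (h : ∀ r x, f r x = r ++ f [] x) (ls : List α) : ∀ (r : List String),
    ls.foldl f r = r ++ ls.foldl f [] := by
  induction ls with
  | nil => simp
  | cons x xs ih =>
    intro r
    simp only [List.foldl_cons]
    rw [ih (f r x), h r x, ih (f [] x), List.append_assoc]

theorem pvB_emitSec_acc (c s : String) (r : List String) (sec : String × List String) :
    pvB_emitSec c s r sec = r ++ pvB_emitSec c s [] sec := by
  simp only [pvB_emitSec]
  exact pv_foldl_acc _ (pvB_emitBullet_acc sec.1 c s) sec.2 r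

theorem pvB_secsRows_append (c s : String) (xs ys : List (String × List String)) :
    List.foldl (pvB_emitSec c s) [] (xs ++ ys) =
      List.foldl (pvB_emitSec c s) [] xs ++ List.foldl (pvB_emitSec c s) [] ys := by
  rw [List.foldl_append, pv_foldl_acc _ (pvB_emitSec_acc c s) ys]

-- the heart: B's grouped sections render exactly the rows of A's stateful scan
theorem pv_sections_rows (c s : String) (ls : List String) :
    ∀ (cur : String) (bs : List String) (secs0 : List (String × List String)),
    List.foldl (pvB_emitSec c s) [] (List.foldl pvB_secStep (secs0 ++ [(cur, bs)]) ls) =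
      List.foldl (pvB_emitSec c s) [] secs0 ++ List.foldl (pvB_emitBullet cur c s) [] bs
        ++ (List.foldl (pvA_lineStep c s) (cur, []) ls).2 := by
  induction ls with
  | nil =>
    intro cur bs secs0
    simp only [List.foldl_nil, pvB_secsRows_append, List.append_nil]
    rw [show List.foldl (pvB_emitSec c s) [] [(cur, bs)] = List.foldl (pvB_emitBullet cur c s) [] bs from rfl]
  | cons l ls ih =>
    intro cur bs secs0
    simp only [List.foldl_cons, pvA_lineStep_char, pvB_secStep]
    cases h : pvB_headerType (PySem.Str.strip l) with
    | some t =>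
      dsimp only
      rw [List.append_assoc, ← List.append_assoc secs0, ih t [] (secs0 ++ [(cur, bs)]),
        pvB_secsRows_append c s secs0 [(cur, bs)]]
      simp only [List.foldl_nil, List.append_assoc]
      rw [show List.foldl (pvB_emitSec c s) [] [(cur, bs)] = List.foldl (pvB_emitBullet cur c s) [] bs from rfl]
      simp
    | none =>
      dsimp only
      rw [List.dropLast_concat, List.getLastD_concat]
      rw [ih cur (bs ++ [PySem.Str.strip l]) secs0]
      rw [pvA_scan_acc c s ls cur (pvB_emitBullet cur c s [] (PySem.Str.strip l))]
      rw [List.foldl_append, List.foldl_cons, List.foldl_nil,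
          pvB_emitBullet_acc cur c s (List.foldl (pvB_emitBullet cur c s) [] bs) (PySem.Str.strip l)]
      simp

-- per block: A's step appends exactly B's block body
theorem pv_block_eq (r : List String) (block : List (String × String)) :
    pvA_blockStep r block = r ++ pvB_blockStep [] block := by
  simp only [pvA_blockStep, pvB_blockStep, pvB_sections]
  rw [pvA_scan_acc]
  have h := pv_sections_rows ((PySem.Dict.mk block).getD "confidence" "")
    ((PySem.Dict.mk block).getD "source" "")
    (PySem.Str.splitlines ((PySem.Dict.mk block).getD "content" "")) "Neutral" [] []
  simp only [List.nil_append, List.foldl_nil] at h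
  rw [← h]

theorem pv_blocks_eq (bl : List (List (String × String))) : ∀ (r : List String),
    bl.foldl pvA_blockStep r = r ++ bl.foldl pvB_blockStep [] := by
  have hacc : ∀ r x, pvB_blockStep r x = r ++ pvB_blockStep [] x := by
    intro r x
    simp only [pvB_blockStep]
    exact pv_foldl_acc _ (pvB_emitSec_acc _ _) _ r
  induction bl with
  | nil => simp
  | cons b bs ih =>
    intro r
    simp only [List.foldl_cons]
    rw [ih (pvA_blockStep r b), pv_block_eq r b, pv_foldl_acc _ hacc bs (pvB_blockStep [] b),
      List.append_assoc]

-- ===== VERDICT (by name: the statement is the Claim_ definition above) =====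
set_option maxRecDepth 8192 in
theorem build_signal_matrix_py_spec : Claim_equal_build_signal_matrix_py := by
  intro signal_blocks brand _ _
  unfold Spec_build_signal_matrix_py build_signal_matrix_py build_signal_matrix_py_alt
  by_cases h : signal_blocks = []
  · simp only [h]
    decide
  · simp only [if_neg h]
    rw [pv_blocks_eq]
    set body := (PySem.List.sorted signal_blocks (fun x => (PySem.Dict.mk x).getD "confidence" "") true).foldl pvB_blockStep [] with hb
    by_cases hbody : body = []
    · simp [pvB_header, hbody]
    · rw [if_neg (by simp [hbody]), if_neg hbody]
      simp [pvB_header]
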